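-- pv_equiv track=rewrite | github.com/Ayaka-Nakajima/dsa | NAKAJIMA_AYAKA_1.py | compute_hut_sets
-- ===== SOURCE A (Python) =====
-- import math
--
-- def distance(a, b):
--     return math.sqrt((a[0] - b[0])**2 + (a[1] - b[1])**2)
--
-- def compute_hut_sets(forest):
--     sets = []  # list of (location, frozenset)
--     for i in range(20):
--         for j in range(20):
--             hut = (i, j)
--             cover = set()
--             for f in forest:
--                 if distance(hut, f) <= 8:
--                     cover.add(f)
--             if cover:
--                 sets.append((hut, frozenset(cover)))
--     return sets
-- ===== SOURCE B (Python) =====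
-- def compute_hut_sets(forest):
--     # Inverted loop: scatter each forest point into the (at most 17x17) window of
--     # grid huts that can cover it, accumulating hut -> set; then emit row-major.
--     cover = {}
--     for (x, y) in forest:
--         for i in range(max(0, x - 8), min(20, x + 9)):
--             for j in range(max(0, y - 8), min(20, y + 9)):
--                 if (i - x) ** 2 + (j - y) ** 2 <= 64:
--                     s = cover.get((i, j), set())
--                     s.add((x, y))
--                     cover[(i, j)] = s
--     result = []
--     for i in range(20):
--         for j in range(20):
--             s = cover.get((i, j))
--             if s:
--                 result.append(((i, j), frozenset(s)))
--     return result
-- ===== Notes on version B (the rewrite author's own statement) =====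
-- stated objective: faster
-- what changed: Inverts the nested loops: instead of scanning the whole forest once per each of the 400 huts (with a float sqrt per pair), B scatters each forest point once into the <=17x17 window of huts that can cover it via an integer squared-distance test, accumulating a dict hut->set, then emits non-empty huts in row-major order.
import Mathlib
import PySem

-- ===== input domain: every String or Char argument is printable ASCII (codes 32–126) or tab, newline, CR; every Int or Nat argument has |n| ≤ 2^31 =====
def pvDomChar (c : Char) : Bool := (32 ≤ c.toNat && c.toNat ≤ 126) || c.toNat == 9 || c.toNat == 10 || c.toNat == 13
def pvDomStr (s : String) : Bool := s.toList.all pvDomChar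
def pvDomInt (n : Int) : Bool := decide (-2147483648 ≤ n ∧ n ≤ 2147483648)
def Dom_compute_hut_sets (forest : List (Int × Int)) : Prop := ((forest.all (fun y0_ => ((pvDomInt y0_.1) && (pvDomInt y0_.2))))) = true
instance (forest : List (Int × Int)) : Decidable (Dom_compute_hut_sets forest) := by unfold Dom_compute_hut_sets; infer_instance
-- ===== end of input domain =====

-- B inverts A's nested loops (scatter each forest point into its hut window, then emit
-- row-major) instead of scanning the forest once per hut; objective: faster by the
-- mechanism a timing run measures (the return value is proved identical).

-- ===== PORT A =====
-- Python's 'distance(hut, f) <= 8' is 'math.sqrt(dx**2 + dy**2) <= 8.0'; the arguments are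
-- integers, IEEE sqrt is correctly rounded and 8/64 are exactly representable, so for an
-- integer n the test 'sqrt(n) <= 8' holds iff n <= 64 — this integer comparison is the
-- exact port of the float test on the integer domain.
def chsNear (a b : Int × Int) : Bool := decide ((a.1 - b.1) ^ 2 + (a.2 - b.2) ^ 2 ≤ 64)

def compute_hut_sets (forest : List (Int × Int)) : List ((Int × Int) × (List (Int × Int))) :=
  (PySem.List.pyRange 0 20 1).foldl (fun sets i =>
    (PySem.List.pyRange 0 20 1).foldl (fun sets j =>
      let hut : Int × Int := (i, j)
      let cover : PySem.Set (Int × Int) :=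
        forest.foldl (fun c f => if chsNear hut f then PySem.Set.add c f else c) PySem.Set.empty
      if cover ≠ [] then sets ++ [(hut, cover)] else sets) sets) []

-- ===== PORT B =====
def compute_hut_sets_alt (forest : List (Int × Int)) : List ((Int × Int) × (List (Int × Int))) :=
  let cover : PySem.Dict (Int × Int) (PySem.Set (Int × Int)) :=
    forest.foldl (fun d f =>
      (PySem.List.pyRange (max 0 (f.1 - 8)) (min 20 (f.1 + 9)) 1).foldl (fun d i =>
        (PySem.List.pyRange (max 0 (f.2 - 8)) (min 20 (f.2 + 9)) 1).foldl (fun d j =>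
          if (i - f.1) ^ 2 + (j - f.2) ^ 2 ≤ 64 then
            d.modify (i, j) PySem.Set.empty (fun s => PySem.Set.add s f)
          else d) d) d)
      PySem.Dict.empty
  (PySem.List.pyRange 0 20 1).foldl (fun res i =>
    (PySem.List.pyRange 0 20 1).foldl (fun res j =>
      let s : PySem.Set (Int × Int) := cover.getD (i, j) PySem.Set.empty
      if s ≠ [] then res ++ [((i, j), s)] else res) res) []

-- ===== PRECONDITION & SPEC =====
def Spec_compute_hut_sets (forest : List (Int × Int)) (out : List ((Int × Int) × (List (Int × Int)))) : Prop := out = compute_hut_sets_alt forest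
instance (forest : List (Int × Int)) (out : List ((Int × Int) × (List (Int × Int)))) : Decidable (Spec_compute_hut_sets forest out) := by unfold Spec_compute_hut_sets; infer_instance

-- ===== CLAIM (what is proved, stated in full; the proofs are below) =====
def Claim_equal_compute_hut_sets : Prop := ∀ (forest : List (Int × Int)), Dom_compute_hut_sets forest → Spec_compute_hut_sets forest (compute_hut_sets forest)

-- ===== LEMMAS AND PROOFS =====

-- effect of one scatter line (fixed i, loop over js) on the dict entry at h
lemma chs_getD_line (f h : Int × Int) (i : Int) (js : List Int) (hnd : js.Nodup)
    (D : PySem.Dict (Int × Int) (PySem.Set (Int × Int))) :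
    (js.foldl (fun d j =>
        if (i - f.1) ^ 2 + (j - f.2) ^ 2 ≤ 64 then
          d.modify (i, j) PySem.Set.empty (fun s => PySem.Set.add s f)
        else d) D).getD h PySem.Set.empty =
    if i = h.1 ∧ h.2 ∈ js ∧ (h.1 - f.1) ^ 2 + (h.2 - f.2) ^ 2 ≤ 64 then
      PySem.Set.add (D.getD h PySem.Set.empty) f
    else D.getD h PySem.Set.empty := by
  obtain ⟨a, b⟩ := h
  induction js generalizing D with
  | nil => simp
  | cons j js ih =>
    simp only [List.foldl_cons]
    rcases List.nodup_cons.mp hnd with ⟨hj, hnd'⟩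
    rw [ih hnd']
    by_cases hij : (i, j) = ((a, b) : Int × Int)
    · obtain ⟨hi, hjh⟩ := Prod.mk.injEq .. ▸ hij
      subst hi; subst hjh
      by_cases hc : (i - f.1) ^ 2 + (j - f.2) ^ 2 ≤ 64
      · have hnm : j ∉ js := hj
        simp [hc, hnm, PySem.Dict.getD_modify_self]
      · simp [hc]
    · have hD' : (if (i - f.1) ^ 2 + (j - f.2) ^ 2 ≤ 64 then
          D.modify (i, j) PySem.Set.empty (fun s => PySem.Set.add s f) else D).getD (a, b)
          PySem.Set.empty = D.getD (a, b) PySem.Set.empty := by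
        split
        · rw [PySem.Dict.getD_modify]; simp [Ne.symm hij]
        · rfl
      rw [hD']
      by_cases hmem : i = (a, b).1 ∧ (a, b).2 ∈ j :: js ∧ ((a, b).1 - f.1) ^ 2 + ((a, b).2 - f.2) ^ 2 ≤ 64
      · obtain ⟨h1, h2, h3⟩ := hmem
        have hj2 : b ≠ j := fun e => hij (by simp_all)
        have hmj : b ∈ js := by
          rcases List.mem_cons.mp h2 with h2 | h2
          · exact absurd h2 hj2
          · exact h2
        simp [h1, hmj, h3]
      · have hne : ¬ (i = (a, b).1 ∧ (a, b).2 ∈ js ∧ ((a, b).1 - f.1) ^ 2 + ((a, b).2 - f.2) ^ 2 ≤ 64) := by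
          intro ⟨u, v, w⟩; exact hmem ⟨u, List.mem_cons_of_mem _ v, w⟩
        simp only [hne, hmem, if_false]

-- effect of the whole window double-loop for one forest point on entry h (generic outer list)
lemma chs_getD_plane (f h : Int × Int) (is : List Int) (hnd : is.Nodup)
    (D : PySem.Dict (Int × Int) (PySem.Set (Int × Int))) :
    (is.foldl (fun d i =>
        (PySem.List.pyRange (max 0 (f.2 - 8)) (min 20 (f.2 + 9)) 1).foldl (fun d j =>
          if (i - f.1) ^ 2 + (j - f.2) ^ 2 ≤ 64 then
            d.modify (i, j) PySem.Set.empty (fun s => PySem.Set.add s f)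
          else d) d) D).getD h PySem.Set.empty =
    if h.1 ∈ is ∧ h.2 ∈ PySem.List.pyRange (max 0 (f.2 - 8)) (min 20 (f.2 + 9)) 1 ∧
        (h.1 - f.1) ^ 2 + (h.2 - f.2) ^ 2 ≤ 64 then
      PySem.Set.add (D.getD h PySem.Set.empty) f
    else D.getD h PySem.Set.empty := by
  induction is generalizing D with
  | nil => simp
  | cons i is ih =>
    simp only [List.foldl_cons]
    rcases List.nodup_cons.mp hnd with ⟨hi', hnd'⟩
    rw [ih hnd', chs_getD_line f h i _ (PySem.List.nodup_pyRange_one _ _) D]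
    by_cases hih : i = h.1
    · subst hih
      by_cases hrest : h.2 ∈ PySem.List.pyRange (max 0 (f.2 - 8)) (min 20 (f.2 + 9)) 1 ∧
          (h.1 - f.1) ^ 2 + (h.2 - f.2) ^ 2 ≤ 64
      · simp [hrest.1, hrest.2, hi']
      · simp only [true_and] at *
        simp [hi']
    · have hno : ¬ (i = h.1 ∧ h.2 ∈ PySem.List.pyRange (max 0 (f.2 - 8)) (min 20 (f.2 + 9)) 1 ∧
          (h.1 - f.1) ^ 2 + (h.2 - f.2) ^ 2 ≤ 64) := fun ⟨u, _, _⟩ => hih u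
      rw [if_neg hno]
      by_cases hmem : h.1 ∈ i :: is
      · rcases List.mem_cons.mp hmem with e | e
        · exact absurd e.symm hih
        · simp [hmem, e]
      · have hni : h.1 ∉ is := fun e => hmem (List.mem_cons_of_mem _ e)
        simp [hmem, hni]

-- effect of scattering one forest point f on the dict entry at a grid hut h
lemma chs_getD_step (f h : Int × Int) (hi : 0 ≤ h.1 ∧ h.1 < 20) (hj : 0 ≤ h.2 ∧ h.2 < 20)
    (D : PySem.Dict (Int × Int) (PySem.Set (Int × Int))) :
    ((PySem.List.pyRange (max 0 (f.1 - 8)) (min 20 (f.1 + 9)) 1).foldl (fun d i =>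
        (PySem.List.pyRange (max 0 (f.2 - 8)) (min 20 (f.2 + 9)) 1).foldl (fun d j =>
          if (i - f.1) ^ 2 + (j - f.2) ^ 2 ≤ 64 then
            d.modify (i, j) PySem.Set.empty (fun s => PySem.Set.add s f)
          else d) d) D).getD h PySem.Set.empty =
    if chsNear h f then PySem.Set.add (D.getD h PySem.Set.empty) f
    else D.getD h PySem.Set.empty := by
  rw [chs_getD_plane f h _ (PySem.List.nodup_pyRange_one _ _) D]
  by_cases hc : (h.1 - f.1) ^ 2 + (h.2 - f.2) ^ 2 ≤ 64
  · have hd1 : (h.1 - f.1) ^ 2 ≤ 64 := by nlinarith [sq_nonneg (h.2 - f.2)]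
    have hd2 : (h.2 - f.2) ^ 2 ≤ 64 := by nlinarith [sq_nonneg (h.1 - f.1)]
    have hb1 : f.1 - 8 ≤ h.1 ∧ h.1 ≤ f.1 + 8 := by constructor <;> nlinarith
    have hb2 : f.2 - 8 ≤ h.2 ∧ h.2 ≤ f.2 + 8 := by constructor <;> nlinarith
    have m1 : h.1 ∈ PySem.List.pyRange (max 0 (f.1 - 8)) (min 20 (f.1 + 9)) 1 := by
      rw [PySem.List.mem_pyRange_one]; omega
    have m2 : h.2 ∈ PySem.List.pyRange (max 0 (f.2 - 8)) (min 20 (f.2 + 9)) 1 := by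
      rw [PySem.List.mem_pyRange_one]; omega
    simp [m1, m2, hc, chsNear]
  · simp [hc, chsNear]

-- the accumulated dict entry at a grid hut h is exactly A's cover set for h
lemma chs_getD_dict (forest : List (Int × Int)) (h : Int × Int)
    (hi : 0 ≤ h.1 ∧ h.1 < 20) (hj : 0 ≤ h.2 ∧ h.2 < 20)
    (D : PySem.Dict (Int × Int) (PySem.Set (Int × Int))) :
    ((forest.foldl (fun d f =>
      (PySem.List.pyRange (max 0 (f.1 - 8)) (min 20 (f.1 + 9)) 1).foldl (fun d i =>
        (PySem.List.pyRange (max 0 (f.2 - 8)) (min 20 (f.2 + 9)) 1).foldl (fun d j =>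
          if (i - f.1) ^ 2 + (j - f.2) ^ 2 ≤ 64 then
            d.modify (i, j) PySem.Set.empty (fun s => PySem.Set.add s f)
          else d) d) d) D).getD h PySem.Set.empty) =
    forest.foldl (fun c f => if chsNear h f then PySem.Set.add c f else c)
      (D.getD h PySem.Set.empty) := by
  induction forest generalizing D with
  | nil => rfl
  | cons f fs ih =>
    simp only [List.foldl_cons]
    rw [ih, chs_getD_step f h hi hj D]

-- ===== VERDICT (by name: the statement is the Claim_ definition above) =====
theorem compute_hut_sets_spec : Claim_equal_compute_hut_sets := by
  intro forest _
  unfold Spec_compute_hut_sets compute_hut_sets compute_hut_sets_alt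
  apply PySem.List.foldl_congr_mem
  intro acc i hi
  apply PySem.List.foldl_congr_mem
  intro acc' j hj
  rw [PySem.List.mem_pyRange_one] at hi hj
  have := chs_getD_dict forest (i, j) ⟨hi.1, hi.2⟩ ⟨hj.1, hj.2⟩ PySem.Dict.empty
  simp only [PySem.Dict.getD_empty] at this
  simp only [this]
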